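-- pv_equiv track=rewrite | github.com/gmike07/huji | intro-67101/ex4/hangman.py | create_list_choose_letter
-- ===== SOURCE A (Python) =====
-- IGNORE_NUM = -1
--
-- RESET_NUM = 0
--
-- LETTERS = ['a', 'b', 'c', 'd', 'e', 'f', 'g', 'h', 'i', 'j', 'k', 'l', 'm',
--            'n', 'o', 'p', 'q', 'r', 's', 't', 'u', 'v', 'w', 'x', 'y', 'z']
--
-- def create_list_choose_letter(pattern):
--     """
--     :param pattern: gets the current pattern of the user (string)
--     :return: creates a list with 25 places each
--             place is 0 if the letter is not in pattern else 1
--     """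
--     lst = list()
--     for letter in LETTERS:
--         if letter in pattern:
--             lst.append(IGNORE_NUM)
--         else:
--             lst.append(RESET_NUM)
--     return lst
-- ===== SOURCE B (Python) =====
-- IGNORE_NUM = -1
--
-- RESET_NUM = 0
--
--
-- def create_list_choose_letter(pattern):
--     lst = [RESET_NUM] * 26
--     for ch in pattern:
--         idx = ord(ch) - ord('a')
--         if 0 <= idx < 26:
--             lst[idx] = IGNORE_NUM
--     return lst
-- ===== Notes on version B (the rewrite author's own statement) =====
-- stated objective: alternative
-- what changed: Instead of scanning all 26 letters and testing each for membership in the pattern, B makes a single pass over the pattern's characters and marks slot ord(ch)-97 in a preallocated 26-entry zero list, ignoring out-of-range characters.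
import Mathlib
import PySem

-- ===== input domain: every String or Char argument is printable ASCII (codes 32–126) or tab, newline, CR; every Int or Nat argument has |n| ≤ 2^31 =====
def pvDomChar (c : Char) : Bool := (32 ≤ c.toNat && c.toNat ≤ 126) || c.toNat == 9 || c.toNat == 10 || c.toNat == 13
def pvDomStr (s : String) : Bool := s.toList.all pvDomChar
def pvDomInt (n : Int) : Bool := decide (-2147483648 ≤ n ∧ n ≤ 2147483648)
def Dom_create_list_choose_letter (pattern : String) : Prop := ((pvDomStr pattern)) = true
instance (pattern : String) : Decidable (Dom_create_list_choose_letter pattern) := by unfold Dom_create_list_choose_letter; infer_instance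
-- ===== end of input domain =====

-- B replaces A's scan of the 26-letter alphabet (with a membership test in the pattern for
-- each letter) by a single pass over the pattern that marks slot ord(ch)-ord('a') of a
-- preallocated 26-entry zero list; same return value, alternative decomposition.

-- ===== PORT A =====
def pvLETTERS : List String :=
  ["a", "b", "c", "d", "e", "f", "g", "h", "i", "j", "k", "l", "m",
   "n", "o", "p", "q", "r", "s", "t", "u", "v", "w", "x", "y", "z"]

def create_list_choose_letter (pattern : String) : List Int :=
  -- lst = list(); for letter in LETTERS: append -1 if letter in pattern else 0
  pvLETTERS.foldl
    (fun lst letter =>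
      if PySem.Str.isIn letter pattern then lst ++ [(-1 : Int)] else lst ++ [(0 : Int)])
    []

-- ===== PORT B =====
-- the body of B's loop: idx = ord(ch) - ord('a'); if 0 <= idx < 26: lst[idx] = -1
def pvMark (lst : List Int) (ch : Char) : List Int :=
  -- idx := ord(ch) - ord('a'), inlined
  if 0 ≤ (ch.toNat : Int) - 97 ∧ (ch.toNat : Int) - 97 < 26
  then lst.set ((ch.toNat : Int) - 97).toNat (-1) else lst

def create_list_choose_letter_alt (pattern : String) : List Int :=
  -- lst = [0]*26; for ch in pattern: pvMark
  pattern.toList.foldl pvMark (List.replicate 26 (0 : Int))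

-- ===== PRECONDITION & SPEC =====
def Spec_create_list_choose_letter (pattern : String) (out : List Int) : Prop := out = create_list_choose_letter_alt pattern
instance (pattern : String) (out : List Int) : Decidable (Spec_create_list_choose_letter pattern out) := by unfold Spec_create_list_choose_letter; infer_instance

-- ===== CLAIM (what is proved, stated in full; the proofs are below) =====
def Claim_equal_create_list_choose_letter : Prop := ∀ (pattern : String), Dom_create_list_choose_letter pattern → Spec_create_list_choose_letter pattern (create_list_choose_letter pattern)

-- ===== LEMMAS AND PROOFS =====

-- A's fold-with-append is the map of the per-letter test over the alphabet.
theorem pvFoldAppend {α β : Type} (f : α → β) (xs : List α) (acc : List β) :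
    xs.foldl (fun l x => l ++ [f x]) acc = acc ++ xs.map f := by
  induction xs generalizing acc with
  | nil => simp
  | cons x xs ih => simp [List.foldl, ih]

theorem pvA_eq_map (pattern : String) :
    create_list_choose_letter pattern =
      pvLETTERS.map (fun letter => if PySem.Str.isIn letter pattern then (-1 : Int) else 0) := by
  unfold create_list_choose_letter
  have hfn : (fun (lst : List Int) (letter : String) =>
      if PySem.Str.isIn letter pattern then lst ++ [(-1 : Int)] else lst ++ [(0 : Int)])
      = (fun lst letter =>
          lst ++ [if PySem.Str.isIn letter pattern then (-1 : Int) else 0]) := by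
    funext lst letter; split <;> rfl
  rw [hfn, pvFoldAppend]
  simp

-- single-character substring test = character membership
theorem pvIsIn_single (c : Char) (s : String) :
    PySem.Str.isIn (String.ofList [c]) s = s.toList.contains c := by
  have hbridge : PySem.Str.isIn (String.ofList [c]) s = PySem.Chars.isIn [c] s.toList := by
    simp
  rw [hbridge]
  by_cases h : c ∈ s.toList
  · obtain ⟨pre, suf, hps⟩ := List.append_of_mem h
    have hinf : [c] <:+: s.toList := ⟨pre, suf, by rw [hps]; simp⟩
    rw [(PySem.Chars.isIn_iff_infix [c] s.toList).mpr hinf]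
    simp [h]
  · have hninf : ¬ ([c] <:+: s.toList) := fun hin => h (hin.subset (by simp))
    have hfalse : PySem.Chars.isIn [c] s.toList = false := by
      cases hx : PySem.Chars.isIn [c] s.toList
      · rfl
      · exact absurd ((PySem.Chars.isIn_iff_infix [c] s.toList).mp hx) hninf
    rw [hfalse]
    simp [h]

theorem pvMark_length (l : List Int) (c : Char) : (pvMark l c).length = l.length := by
  unfold pvMark; split <;> simp

theorem pvFold_length (cs : List Char) (l : List Int) :
    (cs.foldl pvMark l).length = l.length := by
  induction cs generalizing l with
  | nil => rfl
  | cons c cs ih => rw [List.foldl_cons, ih, pvMark_length]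

-- B's loop invariant: slot i holds -1 iff some scanned character has code 97+i.
theorem pvFold_getD (cs : List Char) (l : List Int) (i : Nat) (hl : l.length = 26)
    (hi : i < 26) :
    (cs.foldl pvMark l)[i]?.getD 0 =
      if cs.any (fun c => c.toNat == 97 + i) then -1 else l[i]?.getD 0 := by
  induction cs generalizing l with
  | nil => simp
  | cons c cs ih =>
    rw [List.foldl_cons, ih (pvMark l c) (by rw [pvMark_length]; exact hl), List.any_cons]
    by_cases hc : c.toNat = 97 + i
    · have hcond : (0 : Int) ≤ (c.toNat : Int) - 97 ∧ (c.toNat : Int) - 97 < 26 := by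
        constructor <;> omega
      have hidx : ((c.toNat : Int) - 97).toNat = i := by omega
      have hmark : (pvMark l c)[i]?.getD 0 = -1 := by
        unfold pvMark
        rw [if_pos hcond, hidx, List.getElem?_set_self (by omega)]
        simp
      by_cases hca : cs.any (fun d => d.toNat == 97 + i) = true <;> simp [hc, hca, hmark]
    · have hmark : (pvMark l c)[i]? = l[i]? := by
        unfold pvMark
        split
        · exact List.getElem?_set_ne (by omega)
        · rfl
      by_cases hca : cs.any (fun d => d.toNat == 97 + i) = true <;> simp [hc, hca, hmark]

theorem pvLETTERS_get (i : Nat) (hi : i < 26) :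
    ∃ c : Char, pvLETTERS[i]'(by simp [pvLETTERS]; omega) = String.ofList [c] ∧
      c.toNat = 97 + i := by
  interval_cases i <;> exact ⟨_, rfl, rfl⟩

theorem pvChar_toNat_inj {c d : Char} (h : c.toNat = d.toNat) : c = d :=
  Char.ext (UInt32.toNat_inj.mp h)

-- ===== VERDICT (by name: the statement is the Claim_ definition above) =====
theorem create_list_choose_letter_spec : Claim_equal_create_list_choose_letter := by
  intro pattern _
  unfold Spec_create_list_choose_letter
  rw [pvA_eq_map]
  have hlen : (create_list_choose_letter_alt pattern).length = 26 := by
    unfold create_list_choose_letter_alt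
    rw [pvFold_length]; simp
  apply List.ext_getElem
  · rw [hlen]; simp [pvLETTERS]
  · intro i hi1 hi2
    have hi : i < 26 := by rw [hlen] at hi2; exact hi2
    obtain ⟨c, hc, hcn⟩ := pvLETTERS_get i hi
    have hB : (create_list_choose_letter_alt pattern)[i] =
        (create_list_choose_letter_alt pattern)[i]?.getD 0 := by
      rw [List.getElem?_eq_getElem (by rw [hlen]; exact hi)]
      rfl
    rw [List.getElem_map, hc, pvIsIn_single, hB]
    unfold create_list_choose_letter_alt
    rw [pvFold_getD _ _ _ (by simp) hi]
    have hiff : pattern.toList.contains c = pattern.toList.any (fun d => d.toNat == 97 + i) := by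
      simp only [List.contains_eq_any_beq]
      apply Bool.coe_iff_coe.mp
      simp only [List.any_eq_true, beq_iff_eq]
      constructor
      · rintro ⟨x, hx, hxe⟩; subst hxe; exact ⟨c, hx, hcn⟩
      · rintro ⟨x, hx, hxn⟩; exact ⟨x, hx, pvChar_toNat_inj (by omega)⟩
    rw [hiff]
    split
    · rfl
    · rw [List.getElem?_replicate, if_pos hi]
      rfl
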